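-- pv_equiv track=rewrite | github.com/baesh3744/algorithm-solutions | baekjoon/15000/15708.py | get_stone
-- ===== SOURCE A (Python) =====
-- import heapq
--
-- def get_stone(t: int, p: int, k: list[int]) -> int:
--     heap: list[int] = []
--     for stone in k:
--         heapq.heappush(heap, -stone)
--         t -= stone + p
--         if t < 0:
--             t -= heapq.heappop(heap)
--     return len(heap)
-- ===== SOURCE B (Python) =====
-- def get_stone(t: int, p: int, k: list[int]) -> int:
--     selected: list[int] = []
--     for stone in k:
--         selected.append(stone)
--         t -= stone + p
--         if t < 0:
--             mx = max(selected)
--             t += mx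
--             selected.remove(mx)
--     return len(selected)
-- ===== Notes on version B (the rewrite author's own statement) =====
-- stated objective: simpler
-- what changed: Replaces the heapq min-heap of negated costs by a plain list of chosen costs with a linear max-scan and first-occurrence removal when the budget goes negative.
import Mathlib
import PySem

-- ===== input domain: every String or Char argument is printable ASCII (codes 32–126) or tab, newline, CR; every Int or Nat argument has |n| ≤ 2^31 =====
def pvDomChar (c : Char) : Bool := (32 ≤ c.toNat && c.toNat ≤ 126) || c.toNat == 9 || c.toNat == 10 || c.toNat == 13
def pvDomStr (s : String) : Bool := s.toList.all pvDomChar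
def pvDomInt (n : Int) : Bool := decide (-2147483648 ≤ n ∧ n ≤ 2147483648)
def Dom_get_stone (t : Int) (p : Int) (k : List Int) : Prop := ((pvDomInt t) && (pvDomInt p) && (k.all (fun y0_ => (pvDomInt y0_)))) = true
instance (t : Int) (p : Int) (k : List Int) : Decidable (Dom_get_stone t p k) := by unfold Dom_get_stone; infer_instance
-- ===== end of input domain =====

-- B replaces A's heapq min-heap of negated costs by a plain list of the chosen costs with a
-- linear max-scan and first-occurrence removal (objective: simpler, no heap machinery).

-- ===== PORT A =====
-- heapq is modelled exactly as a min-priority queue over Int: the heap is kept sorted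
-- ascending, heappush is an ordered insertion and heappop returns the head, which is the
-- minimum — exactly the value Python's heapq.heappop returns (heapq's internal array layout
-- is unobservable here: only the popped values and the heap's length reach the result).
def pvHeappush (heap : List Int) (x : Int) : List Int :=
  PySem.List.insertBy (fun a b => decide (a < b)) x heap

-- the body of A's 'for stone in k' loop, state = (heap, t)
def pvStepA (p : Int) (st : List Int × Int) (stone : Int) : List Int × Int :=
  let heap := pvHeappush st.1 (-stone)
  let t' := st.2 - (stone + p)
  if t' < 0 then
    match heap with
    | [] => ([], t')            -- unreachable: the heap is nonempty right after a push
    | m :: rest => (rest, t' - m)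
  else (heap, t')

def get_stone (t : Int) (p : Int) (k : List Int) : Int :=
  ((k.foldl (pvStepA p) ([], t)).1.length : Int)

-- ===== PORT B =====
-- the body of B's 'for stone in k' loop, state = (selected, t)
def pvStepB (p : Int) (st : List Int × Int) (stone : Int) : List Int × Int :=
  let selected := st.1 ++ [stone]
  let t' := st.2 - (stone + p)
  if t' < 0 then
    match PySem.List.max? selected (fun y => y) with
    | none => (selected, t')          -- unreachable: selected is nonempty
    | some mx =>
      match PySem.List.remove? selected mx with
      | none => (selected, t' + mx)   -- unreachable: mx ∈ selected
      | some rest => (rest, t' + mx)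
  else (selected, t')

def get_stone_alt (t : Int) (p : Int) (k : List Int) : Int :=
  ((k.foldl (pvStepB p) ([], t)).1.length : Int)

-- ===== PRECONDITION & SPEC =====
def Spec_get_stone (t : Int) (p : Int) (k : List Int) (out : Int) : Prop := out = get_stone_alt t p k
instance (t : Int) (p : Int) (k : List Int) (out : Int) : Decidable (Spec_get_stone t p k out) := by unfold Spec_get_stone; infer_instance

-- ===== CLAIM (what is proved, stated in full; the proofs are below) =====
def Claim_equal_get_stone : Prop := ∀ (t : Int) (p : Int) (k : List Int), Dom_get_stone t p k → Spec_get_stone t p k (get_stone t p k)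

-- ===== LEMMAS AND PROOFS =====

-- Ordered insertion into a sorted list is exactly sorting the list with the new element appended.
theorem pvHeappush_eq_sorted (heap : List Int) (x : Int)
    (h : heap.Pairwise (· ≤ ·)) :
    pvHeappush heap x = PySem.List.sorted (heap ++ [x]) (fun y => y) false := by
  have h1 := PySem.List.sorted_eq_foldl_insertBy (heap ++ [x]) (fun y : Int => y)
  have h2 := PySem.List.sorted_eq_foldl_insertBy heap (fun y : Int => y)
  have h3 : PySem.List.sorted heap (fun y => y) false = heap :=
    PySem.List.sorted_eq_self_of_pairwise heap (fun y => y) h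
  rw [h1, List.foldl_append, ← h2, h3]
  rfl

-- The coupling invariant: A's heap is sorted ascending and holds exactly the negations
-- (as a multiset) of B's selected costs.
def pvRel (heap selected : List Int) : Prop :=
  heap.Pairwise (· ≤ ·) ∧ heap.Perm (selected.map (fun s => -s))

theorem pvStep_rel (p : Int) (heap selected : List Int) (tv stone : Int)
    (h : pvRel heap selected) :
    pvRel (pvStepA p (heap, tv) stone).1 (pvStepB p (selected, tv) stone).1
    ∧ (pvStepA p (heap, tv) stone).2 = (pvStepB p (selected, tv) stone).2 := by
  obtain ⟨hs, hperm⟩ := h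
  have hpush : pvHeappush heap (-stone)
      = PySem.List.sorted (heap ++ [-stone]) (fun y => y) false :=
    pvHeappush_eq_sorted heap (-stone) hs
  have hperm' : (pvHeappush heap (-stone)).Perm
      ((selected ++ [stone]).map (fun s => -s)) := by
    rw [hpush]
    refine (PySem.List.sorted_perm _ _ _).trans ?_
    rw [List.map_append]
    exact hperm.append (List.Perm.refl _)
  have hs' : (pvHeappush heap (-stone)).Pairwise (· ≤ ·) := by
    rw [hpush]
    exact PySem.List.sorted_pairwise (heap ++ [-stone]) (fun y => y)
  by_cases ht : tv - (stone + p) < 0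
  · -- pop branch taken on both sides
    have hne : pvHeappush heap (-stone) ≠ [] := by
      intro h0
      rw [hpush] at h0
      have := (PySem.List.sorted_eq_nil_iff (heap ++ [-stone]) (fun y => y) false).mp h0
      simp at this
    obtain ⟨m, rest, hmr⟩ : ∃ m rest, pvHeappush heap (-stone) = m :: rest :=
      match pvHeappush heap (-stone), hne with
      | x :: xs, _ => ⟨x, xs, rfl⟩
    obtain ⟨mx, hmx⟩ : ∃ mx, PySem.List.max? (selected ++ [stone]) (fun y => y) = some mx := by
      cases hq : PySem.List.max? (selected ++ [stone]) (fun y => y) with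
      | none =>
        exact absurd ((PySem.List.max?_eq_none_iff _ _).mp hq) (by simp)
      | some v => exact ⟨v, rfl⟩
    have hmxmem : mx ∈ selected ++ [stone] := PySem.List.max?_mem hmx
    have hmxmax : ∀ y ∈ selected ++ [stone], y ≤ mx := fun y hy =>
      PySem.List.max?_isMax hmx y hy
    rw [hmr] at hperm' hs'
    -- the popped head m equals -mx
    have h1 : -mx ≤ m := by
      have hmem : m ∈ (selected ++ [stone]).map (fun s => -s) :=
        hperm'.mem_iff.mp List.mem_cons_self
      obtain ⟨s, hsmem, hsm⟩ := List.mem_map.mp hmem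
      have := hmxmax s hsmem
      omega
    have h2 : m ≤ -mx := by
      have hmem : -mx ∈ m :: rest :=
        hperm'.mem_iff.mpr (List.mem_map.mpr ⟨mx, hmxmem, rfl⟩)
      rcases List.mem_cons.mp hmem with hmm | hmm
      · exact le_of_eq hmm.symm
      · exact (List.pairwise_cons.mp hs').1 _ hmm
    have hmmx : m = -mx := le_antisymm h2 h1
    have hrem : PySem.List.remove? (selected ++ [stone]) mx
        = some ((selected ++ [stone]).erase mx) :=
      PySem.List.remove?_eq_some_erase _ mx hmxmem
    have hinj : Function.Injective (fun s : Int => -s) := fun a b hab => by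
      simpa using congrArg Neg.neg hab
    have hmap : ((selected ++ [stone]).erase mx).map (fun s => -s)
        = ((selected ++ [stone]).map (fun s => -s)).erase (-mx) :=
      List.map_erase hinj (selected ++ [stone])
    have hrestperm : rest.Perm (((selected ++ [stone]).erase mx).map (fun s => -s)) := by
      have := hperm'.erase m
      rw [List.erase_cons_head] at this
      rw [hmap, ← hmmx]
      exact this
    constructor
    · refine ⟨?_, ?_⟩
      · simp only [pvStepA, ht, if_pos, hmr]
        exact (List.pairwise_cons.mp hs').2
      · simp only [pvStepA, pvStepB, ht, if_pos, hmr, hmx, hrem]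
        exact hrestperm
    · simp only [pvStepA, pvStepB, ht, if_pos, hmr, hmx, hrem]
      omega
  · -- keep branch on both sides
    refine ⟨⟨?_, ?_⟩, ?_⟩
    · simp only [pvStepA, ht, if_false]
      exact hs'
    · simp only [pvStepA, pvStepB, ht, if_false]
      exact hperm'
    · simp only [pvStepA, pvStepB, ht, if_false]

theorem pvLoop (k : List Int) (p : Int) (heap selected : List Int) (tv : Int)
    (h : pvRel heap selected) :
    pvRel (k.foldl (pvStepA p) (heap, tv)).1 (k.foldl (pvStepB p) (selected, tv)).1 := by
  induction k generalizing heap selected tv with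
  | nil => exact h
  | cons stone rest ih =>
    have hstep := pvStep_rel p heap selected tv stone h
    simp only [List.foldl_cons]
    rw [show pvStepA p (heap, tv) stone
        = ((pvStepA p (heap, tv) stone).1, (pvStepA p (heap, tv) stone).2) from rfl,
      show pvStepB p (selected, tv) stone
        = ((pvStepB p (selected, tv) stone).1, (pvStepB p (selected, tv) stone).2) from rfl,
      hstep.2]
    exact ih _ _ _ hstep.1

-- ===== VERDICT (by name: the statement is the Claim_ definition above) =====
theorem get_stone_spec : Claim_equal_get_stone := by
  intro t p k _
  unfold Spec_get_stone get_stone get_stone_alt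
  have h := pvLoop k p [] [] t ⟨List.Pairwise.nil, by simp⟩
  have hlen := h.2.length_eq
  rw [List.length_map] at hlen
  exact_mod_cast hlen
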